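-- pv_equiv track=rewrite | github.com/copyleftdev/long-shadow | tools/vet.py | heur_single_sole_author
-- ===== SOURCE A (Python) =====
-- from collections import Counter
--
-- def heur_single_sole_author(commits):
--     emails = Counter(c["commit"]["author"]["email"] for c in commits)
--     if not emails:
--         return False, ""
--     sole = emails.most_common(1)[0]
--     if len(emails) == 1 and sole[1] >= 50:
--         return True, f"single sole author across {sole[1]} commits ({sole[0]})"
--     return False, ""
-- ===== SOURCE B (Python) =====
-- def heur_single_sole_author(commits):
--     if not commits:
--         return False, ""
--     first = commits[0]["commit"]["author"]["email"]
--     n = len(commits)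
--     if all(c["commit"]["author"]["email"] == first for c in commits[1:]) and n >= 50:
--         return True, f"single sole author across {n} commits ({first})"
--     return False, ""
-- ===== Notes on version B (the rewrite author's own statement) =====
-- stated objective: simpler
-- what changed: Replaces the Counter/most_common frequency table with a direct short-circuiting check that all commits share the first commit's author email, using len(commits) as the count.
import Mathlib
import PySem

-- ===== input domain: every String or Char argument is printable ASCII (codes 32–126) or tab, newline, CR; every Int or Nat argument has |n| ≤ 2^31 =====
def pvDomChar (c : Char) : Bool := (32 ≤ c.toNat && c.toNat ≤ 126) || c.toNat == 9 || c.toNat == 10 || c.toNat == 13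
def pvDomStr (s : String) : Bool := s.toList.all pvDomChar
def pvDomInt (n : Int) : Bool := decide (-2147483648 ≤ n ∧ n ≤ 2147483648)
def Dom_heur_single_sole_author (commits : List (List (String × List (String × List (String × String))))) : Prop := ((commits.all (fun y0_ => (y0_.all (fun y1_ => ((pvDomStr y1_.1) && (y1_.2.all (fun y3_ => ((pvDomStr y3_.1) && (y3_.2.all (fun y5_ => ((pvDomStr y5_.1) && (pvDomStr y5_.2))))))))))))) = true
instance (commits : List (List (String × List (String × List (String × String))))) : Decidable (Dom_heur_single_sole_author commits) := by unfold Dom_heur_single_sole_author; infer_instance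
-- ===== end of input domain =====

-- shared accessor: c["commit"]["author"]["email"] (both Pythons perform exactly this chain of dict lookups; Dict.ofList = Python dict built from pairs, later duplicates overwrite);
-- none = KeyError somewhere in the chain (excluded by Pre_)
def pvEmail? (c : List (String × List (String × List (String × String)))) : Option String :=
  ((PySem.Dict.ofList c).get? "commit").bind fun m =>
    ((PySem.Dict.ofList m).get? "author").bind fun a =>
      (PySem.Dict.ofList a).get? "email"

def pvEmail (c : List (String × List (String × List (String × String)))) : String :=
  (pvEmail? c).getD ""

-- ===== PORT A =====
-- B makes a single pass keeping only the first email instead of building a Counter; objective: simpler.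
def heur_single_sole_author (commits : List (List (String × List (String × List (String × String))))) : Bool × String :=
  let emails := PySem.Dict.counter (commits.map pvEmail)
  if emails.items = [] then (false, "")
  else
    let sole := (PySem.List.sorted emails.items (fun p => p.2) true).headD ("", 0)
    if emails.items.length = 1 ∧ 50 ≤ sole.2 then
      (true, "single sole author across " ++ PySem.Int.toStr sole.2 ++ " commits (" ++ sole.1 ++ ")")
    else (false, "")

-- ===== PORT B =====
def heur_single_sole_author_alt (commits : List (List (String × List (String × List (String × String))))) : Bool × String :=
  match commits with
  | [] => (false, "")
  | c :: rest =>
    let first := pvEmail c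
    let n := rest.length + 1
    if rest.all (fun c' => pvEmail c' == first) && decide (50 ≤ n) then
      (true, "single sole author across " ++ PySem.Int.toStr (n : Int) ++ " commits (" ++ first ++ ")")
    else (false, "")

-- ===== PRECONDITION & SPEC =====
-- Pre_: every commit carries the "commit" → "author" → "email" chain of keys (a shape condition on
-- the association lists); otherwise Python A raises KeyError.
def Pre_heur_single_sole_author (commits : List (List (String × List (String × List (String × String))))) : Prop :=
  ∀ c ∈ commits,
    ((((PySem.Dict.ofList c).get? "commit").bind fun m =>
      ((PySem.Dict.ofList m).get? "author").bind fun a =>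
        (PySem.Dict.ofList a).get? "email")).isSome
instance (commits : List (List (String × List (String × List (String × String))))) : Decidable (Pre_heur_single_sole_author commits) := by unfold Pre_heur_single_sole_author; infer_instance
def pvWitness_heur_single_sole_author : (List (List (String × List (String × List (String × String))))) :=
  [[("commit", [("author", [("email", "a@x")])])]]

def Spec_heur_single_sole_author (commits : List (List (String × List (String × List (String × String))))) (out : Bool × String) : Prop := out = heur_single_sole_author_alt commits
instance (commits : List (List (String × List (String × List (String × String))))) (out : Bool × String) : Decidable (Spec_heur_single_sole_author commits out) := by unfold Spec_heur_single_sole_author; infer_instance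

-- ===== CLAIM (what is proved, stated in full; the proofs are below) =====
def Claim_equal_heur_single_sole_author : Prop := ∀ (commits : List (List (String × List (String × List (String × String))))), Dom_heur_single_sole_author commits → Pre_heur_single_sole_author commits → Spec_heur_single_sole_author commits (heur_single_sole_author commits)

-- ===== LEMMAS AND PROOFS =====

-- sorted of a one-element list is itself
lemma pv_sorted_singleton (x : String × Int) :
    PySem.List.sorted [x] (fun p => p.2) true = [x] := rfl

lemma pv_discard_eq_nil (s : List String) (x : String) (h : ∀ y ∈ s, y = x) :
    PySem.Set.discard s x = [] := by
  rw [List.eq_nil_iff_forall_not_mem]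
  intro y hy
  rw [PySem.Set.mem_discard] at hy
  exact hy.2 (h y hy.1)

-- ===== VERDICT (by name: the statement is the Claim_ definition above) =====
theorem heur_single_sole_author_spec : Claim_equal_heur_single_sole_author := by
  intro commits hdom hpre
  unfold Spec_heur_single_sole_author
  match commits with
  | [] => rfl
  | c :: rest =>
    by_cases hall : ∀ c' ∈ rest, pvEmail c' = pvEmail c
    · -- all emails equal the first one
      have hms : ∀ y ∈ rest.map pvEmail, y = pvEmail c := by
        intro y hy
        obtain ⟨c', hc', rfl⟩ := List.mem_map.mp hy
        exact hall c' hc'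
      have hset : PySem.Set.ofList ((c :: rest).map pvEmail) = [pvEmail c] := by
        rw [List.map_cons, PySem.Set.ofList_cons,
            pv_discard_eq_nil _ _ (fun y hy => hms y ((PySem.Set.mem_ofList _ _).mp hy))]
      have hcnt : ((c :: rest).map pvEmail).count (pvEmail c) = rest.length + 1 := by
        rw [List.count_eq_length.mpr]
        · simp
        · intro b hb
          rw [List.map_cons] at hb
          rcases List.mem_cons.mp hb with h | h
          · exact (h ▸ rfl)
          · exact ((hms b h) ▸ rfl)
      have hI : (PySem.Dict.counter ((c :: rest).map pvEmail)).items
          = [(pvEmail c, ((rest.length + 1 : Nat) : Int))] := by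
        rw [PySem.Dict.items_counter, hset, List.map_singleton, hcnt]
      have hB : rest.all (fun c' => pvEmail c' == pvEmail c) = true := by
        rw [List.all_eq_true]
        intro c' hc'
        exact beq_iff_eq.mpr (hall c' hc')
      simp only [heur_single_sole_author, heur_single_sole_author_alt, hI, hB,
        pv_sorted_singleton, Bool.true_and]
      by_cases hn : 50 ≤ rest.length + 1
      · simp [hn, List.headD]
        omega
      · simp [hn, List.headD]
        omega
    · -- some email differs: both sides return (false, "")
      push Not at hall
      obtain ⟨c', hc', hne⟩ := hall
      have hmem : pvEmail c' ∈ PySem.Set.discard (PySem.Set.ofList (rest.map pvEmail)) (pvEmail c) := by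
        rw [PySem.Set.mem_discard]
        exact ⟨(PySem.Set.mem_ofList _ _).mpr (List.mem_map_of_mem hc'), hne⟩
      have hlen : (PySem.Dict.counter ((c :: rest).map pvEmail)).items.length ≠ 1 := by
        obtain ⟨d, ds, hd⟩ := List.exists_cons_of_ne_nil (List.ne_nil_of_mem hmem)
        rw [PySem.Dict.items_counter, List.length_map, List.map_cons, PySem.Set.ofList_cons, hd]
        simp
      have hB : rest.all (fun c' => pvEmail c' == pvEmail c) = false := by
        rw [List.all_eq_false]
        exact ⟨c', hc', by simpa using hne⟩
      simp [heur_single_sole_author, heur_single_sole_author_alt, hB]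
      rw [← List.map_cons]
      intro _ h
      exact absurd h hlen
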